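-- pv_equiv track=rewrite | github.com/amaxman/content_ecommerce | img/image_ocr.py | cluster_coordinates
-- ===== SOURCE A (Python) =====
-- def cluster_coordinates(coordinates, threshold=10):
--     """将相近的坐标聚类（用于识别行）"""
--     if not coordinates:
--         return {}
--
--     # 排序坐标
--     sorted_coords = sorted(coordinates)
--     clusters = {}
--     current_cluster = 0
--     clusters[current_cluster] = [sorted_coords[0], sorted_coords[0]]  # [min, max]
--
--     for coord in sorted_coords[1:]:
--         # 如果当前坐标与上一聚类的最大差值小于阈值，则归为同一聚类
--         if coord - clusters[current_cluster][1] <= threshold: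
--             clusters[current_cluster][1] = coord
--         else:
--             current_cluster += 1
--             clusters[current_cluster] = [coord, coord]
--
--     return clusters
-- ===== SOURCE B (Python) =====
-- def cluster_coordinates(coordinates, threshold=10):
--     """Cluster nearby coordinates into [min, max] ranges: a break-finding pass
--     over adjacent sorted pairs, then zip run-starts with run-ends."""
--     if not coordinates:
--         return {}
--     s = sorted(coordinates)
--     gaps = [(x, y) for x, y in zip(s, s[1:]) if y - x > threshold]
--     starts = [s[0]] + [y for _, y in gaps]
--     ends = [x for x, _ in gaps] + [s[-1]]
--     return {k: [a, b] for k, (a, b) in enumerate(zip(starts, ends))}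
-- ===== Notes on version B (the rewrite author's own statement) =====
-- stated objective: alternative
-- what changed: Replaced the single running-update loop over a counter-keyed dict by a boundary pass: filter adjacent sorted pairs whose gap exceeds the threshold, then zip run starts (first element plus successors of gaps) with run ends (predecessors of gaps plus last element) and enumerate.
import Mathlib
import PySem

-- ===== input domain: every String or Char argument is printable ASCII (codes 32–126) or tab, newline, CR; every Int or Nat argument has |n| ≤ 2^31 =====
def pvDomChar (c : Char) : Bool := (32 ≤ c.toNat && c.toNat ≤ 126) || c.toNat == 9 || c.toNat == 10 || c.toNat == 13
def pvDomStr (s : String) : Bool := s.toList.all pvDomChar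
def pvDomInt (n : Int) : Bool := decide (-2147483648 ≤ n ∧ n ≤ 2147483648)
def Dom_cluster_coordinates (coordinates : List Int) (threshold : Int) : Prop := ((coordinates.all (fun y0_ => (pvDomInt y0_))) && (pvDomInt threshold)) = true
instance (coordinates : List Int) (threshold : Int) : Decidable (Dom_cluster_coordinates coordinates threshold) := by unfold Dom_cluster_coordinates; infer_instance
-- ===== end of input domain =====

-- B replaces A's single running-update loop over a counter-keyed dict by a boundary pass over
-- adjacent sorted pairs plus a zip of run starts with run ends (objective: alternative decomposition).

-- ===== PORT A =====
-- the loop body: if coord - clusters[cur][1] <= threshold: clusters[cur][1] = coord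
--                else: cur += 1; clusters[cur] = [coord, coord]
-- (the dict key `cur` is always present and the cluster value always has length 2,
--  so the getD/pyGetD defaults and List.set are exact here)
def pvStepA (threshold : Int) (st : PySem.Dict Int (List Int) × Int) (coord : Int) :
    PySem.Dict Int (List Int) × Int :=
  let clusters := st.1
  let cur := st.2
  if coord - PySem.List.pyGetD (clusters.getD cur []) 1 0 ≤ threshold then
    (clusters.modify cur [] (fun l => l.set 1 coord), cur)
  else
    (clusters.insert (cur + 1) [coord, coord], cur + 1)

def cluster_coordinates (coordinates : List Int) (threshold : Int) : List (Int × List Int) :=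
  if coordinates = [] then []
  else
    let sorted_coords := PySem.List.sorted coordinates (fun x => x) false
    let c0 := PySem.List.pyGetD sorted_coords 0 0  -- sorted_coords[0]; in range: list nonempty
    let init : PySem.Dict Int (List Int) := PySem.Dict.empty.insert 0 [c0, c0]
    let res := (PySem.List.slice sorted_coords (some 1) none).foldl (pvStepA threshold) (init, 0)
    res.1.items

-- ===== PORT B =====
def cluster_coordinates_alt (coordinates : List Int) (threshold : Int) : List (Int × List Int) :=
  if coordinates = [] then []
  else
    let s := PySem.List.sorted coordinates (fun x => x) false
    let gaps := (s.zip (PySem.List.slice s (some 1) none)).filter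
      (fun p => decide (p.2 - p.1 > threshold))
    let starts := PySem.List.pyGetD s 0 0 :: gaps.map (·.2)   -- s[0], in range: nonempty
    let ends := gaps.map (·.1) ++ [PySem.List.pyGetD s (-1) 0]  -- s[-1], in range: nonempty
    (PySem.List.enumerate (starts.zip ends) 0).map (fun p => (p.1, [p.2.1, p.2.2]))

-- ===== PRECONDITION & SPEC =====
def Spec_cluster_coordinates (coordinates : List Int) (threshold : Int) (out : List (Int × List Int)) : Prop := out = cluster_coordinates_alt coordinates threshold
instance (coordinates : List Int) (threshold : Int) (out : List (Int × List Int)) : Decidable (Spec_cluster_coordinates coordinates threshold out) := by unfold Spec_cluster_coordinates; infer_instance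

-- ===== CLAIM (what is proved, stated in full; the proofs are below) =====
def Claim_equal_cluster_coordinates : Prop := ∀ (coordinates : List Int) (threshold : Int), Dom_cluster_coordinates coordinates threshold → Spec_cluster_coordinates coordinates threshold (cluster_coordinates coordinates threshold)

-- ===== LEMMAS AND PROOFS =====

-- the runs of a sorted list, as (first, last) pairs: the common reference of both ports
def pvGo (th f prev : Int) : List Int → List (Int × Int)
  | [] => [(f, prev)]
  | y :: ys => if y - prev ≤ th then pvGo th f y ys else (f, prev) :: pvGo th y y ys

theorem pvDictOverwrite (P : List (Int × List Int)) (c : Int) (v w : List Int)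
    (h : ∀ k ∈ P.map (·.1), k < c) :
    (PySem.Dict.mk (P ++ [(c, v)])).insert c w = PySem.Dict.mk (P ++ [(c, w)]) := by
  apply PySem.Dict.ext
  rw [PySem.Dict.items_insert_of_contains]
  · simp only [List.map_append]
    congr 1
    · conv_rhs => rw [← List.map_id P]
      apply List.map_congr_left
      intro p hp
      have : p.1 < c := h p.1 (List.mem_map_of_mem hp)
      simp [show (p.1 == c) = false by simpa using by omega]
    · simp
  · simp

theorem pvDictAppend (P : List (Int × List Int)) (k : Int) (w : List Int)
    (h : ∀ j ∈ P.map (·.1), j < k) :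
    (PySem.Dict.mk P).insert k w = PySem.Dict.mk (P ++ [(k, w)]) := by
  apply PySem.Dict.ext
  rw [PySem.Dict.items_insert_of_not_contains]
  simp
  intro a b hab hk
  have := h k (by simpa [hk] using List.mem_map_of_mem (f := (·.1)) hab)
  omega

theorem pvDictGetLast (P : List (Int × List Int)) (c : Int) (v : List Int)
    (h : ∀ k ∈ P.map (·.1), k < c) :
    (PySem.Dict.mk (P ++ [(c, v)])).getD c [] = v := by
  have : (PySem.Dict.mk (P ++ [(c, v)])).get? c = some v := by
    induction P with
    | nil => simp [PySem.Dict.get?_mk_cons]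
    | cons p rest ih =>
      rw [List.cons_append, PySem.Dict.get?_mk_cons]
      have hp : p.1 < c := h p.1 (by simp)
      rw [if_neg (by simpa using by omega)]
      exact ih (fun k hk => h k (by simp [hk]))
  rw [PySem.Dict.getD_eq_get?_getD, this]; rfl

theorem pvGetNegOne_singleton (a d : Int) : PySem.List.pyGetD [a] (-1) d = a := by
  simp [PySem.List.pyGetD, PySem.List.pyGet?, PySem.List.pyIdx?]

theorem pvGetNegOne_cons (a b : Int) (l : List Int) (d : Int) :
    PySem.List.pyGetD (a :: b :: l) (-1) d = PySem.List.pyGetD (b :: l) (-1) d := by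
  simp [PySem.List.pyGetD, PySem.List.pyGet?, PySem.List.pyIdx?]
  rfl

theorem pvGetZero (a : Int) (l : List Int) (d : Int) :
    PySem.List.pyGetD (a :: l) 0 d = a := by
  simp [PySem.List.pyGetD, PySem.List.pyGet?, PySem.List.pyIdx?]

-- A's loop, run from a finished prefix P and a current cluster (c, [f, prev]),
-- produces P followed by the enumerated runs of the remaining input.
theorem pvALoop (th : Int) (rest : List Int) : ∀ (P : List (Int × List Int)) (c f prev : Int),
    (∀ k ∈ P.map (·.1), k < c) →
    (rest.foldl (pvStepA th) (PySem.Dict.mk (P ++ [(c, [f, prev])]), c)).1.items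
      = P ++ (PySem.List.enumerate (pvGo th f prev rest) c).map (fun p => (p.1, [p.2.1, p.2.2])) := by
  induction rest with
  | nil =>
    intro P c f prev h
    simp [pvGo, PySem.List.enumerate_cons, PySem.List.enumerate_nil]
  | cons y ys ih =>
    intro P c f prev h
    rw [List.foldl_cons]
    have hget : (PySem.Dict.mk (P ++ [(c, [f, prev])])).getD c [] = [f, prev] :=
      pvDictGetLast P c [f, prev] h
    by_cases hc : y - prev ≤ th
    · have : pvStepA th (PySem.Dict.mk (P ++ [(c, [f, prev])]), c) y
          = (PySem.Dict.mk (P ++ [(c, [f, y])]), c) := by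
        simp only [pvStepA, hget]
        rw [if_pos (by simpa [PySem.List.pyGetD, PySem.List.pyGet?, PySem.List.pyIdx?] using hc)]
        rw [PySem.Dict.modify, hget]
        simp [pvDictOverwrite P c [f, prev] _ h]
      rw [this, ih P c f y h]
      simp [pvGo, hc]
    · have hins : (PySem.Dict.mk (P ++ [(c, [f, prev])])).insert (c + 1) [y, y]
          = PySem.Dict.mk (P ++ [(c, [f, prev])] ++ [(c + 1, [y, y])]) := by
        apply pvDictAppend
        intro j hj
        rw [List.map_append, List.mem_append] at hj
        rcases hj with hj | hj
        · have := h j hj; omega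
        · simp at hj; omega
      have : pvStepA th (PySem.Dict.mk (P ++ [(c, [f, prev])]), c) y
          = (PySem.Dict.mk (P ++ [(c, [f, prev])] ++ [(c + 1, [y, y])]), c + 1) := by
        simp only [pvStepA, hget]
        rw [if_neg (by simpa [PySem.List.pyGetD, PySem.List.pyGet?, PySem.List.pyIdx?] using hc)]
        simp [hins]
      rw [this, ih (P ++ [(c, [f, prev])]) (c + 1) y y]
      · simp [pvGo, hc, PySem.List.enumerate_cons]
      · intro k hk
        rw [List.map_append, List.mem_append] at hk
        rcases hk with hk | hk
        · have := h k hk; omega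
        · simp at hk; omega

-- B's zip of run starts with run ends is exactly the run list.
theorem pvBRuns (th d : Int) : ∀ (rest : List Int) (f prev : Int),
    (f :: (((prev :: rest).zip rest).filter (fun p => decide (p.2 - p.1 > th))).map (·.2)).zip
      ((((prev :: rest).zip rest).filter (fun p => decide (p.2 - p.1 > th))).map (·.1)
        ++ [PySem.List.pyGetD (prev :: rest) (-1) d])
      = pvGo th f prev rest := by
  intro rest
  induction rest with
  | nil =>
    intro f prev
    simp [pvGo, pvGetNegOne_singleton]
  | cons y ys ih =>
    intro f prev
    rw [List.zip_cons_cons, pvGetNegOne_cons]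
    by_cases hc : y - prev ≤ th
    · rw [List.filter_cons_of_neg (by simpa using by omega)]
      rw [show pvGo th f prev (y :: ys) = pvGo th f y ys by simp [pvGo, hc]]
      exact ih f y
    · rw [List.filter_cons_of_pos (by simpa using by omega)]
      simp only [List.map_cons, List.cons_append, List.zip_cons_cons]
      rw [show pvGo th f prev (y :: ys) = (f, prev) :: pvGo th y y ys by simp [pvGo, hc]]
      rw [ih y y]

-- ===== VERDICT (by name: the statement is the Claim_ definition above) =====
theorem cluster_coordinates_spec : Claim_equal_cluster_coordinates := by
  intro coordinates threshold _
  unfold Spec_cluster_coordinates cluster_coordinates cluster_coordinates_alt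
  by_cases hnil : coordinates = []
  · simp [hnil]
  · rw [if_neg hnil, if_neg hnil]
    have hs : PySem.List.sorted coordinates (fun x => x) false ≠ [] := by
      simpa [PySem.List.sorted_eq_nil_iff] using hnil
    obtain ⟨h, t, hst⟩ : ∃ h t, PySem.List.sorted coordinates (fun x => x) false = h :: t := by
      cases hcase : PySem.List.sorted coordinates (fun x => x) false with
      | nil => exact absurd hcase hs
      | cons a l => exact ⟨a, l, rfl⟩
    simp only [hst, PySem.List.slice_from_one, List.tail_cons]
    simp only [pvGetZero]
    have hinit : PySem.Dict.empty.insert (0 : Int) [h, h] = PySem.Dict.mk [((0 : Int), [h, h])] := by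
      rw [show PySem.Dict.empty = PySem.Dict.mk ([] : List (Int × List Int)) from rfl]
      rw [pvDictAppend [] 0 [h, h] (by simp)]
      rfl
    rw [hinit]
    have hA := pvALoop threshold t [] 0 h h (by simp)
    rw [List.nil_append] at hA
    rw [hA]
    simp only [List.nil_append]
    rw [pvBRuns threshold 0 t h h]
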